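-- pv_equiv track=rewrite | github.com/julioalonzom/philosophical-rag | scripts/process_texts.py | find_book_boundaries
-- ===== SOURCE A (Python) =====
-- from typing import List, Dict, Generator, Set, Tuple, Optional
--
-- def find_book_boundaries(text: str) -> List[Dict[str, int]]:
--     """Find the line boundaries for each book in the text."""
--     lines = text.split('\n')
--     book_boundaries = []
--     current_book = 0
--     for i, line in enumerate(lines):
--         if line.strip().lower().startswith('book'):
--             if current_book > 0:
--                 book_boundaries[-1]['end_line'] = i - 1
--             current_book += 1
--             book_boundaries.append({'number': current_book, 'start_line': i + 1})
--
--     if book_boundaries: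
--         book_boundaries[-1]['end_line'] = len(lines) - 1
--
--     return book_boundaries
-- ===== SOURCE B (Python) =====
-- def find_book_boundaries(text):
--     """Find the line boundaries for each book in the text."""
--     lines = text.split('\n')
--     indices = [i for i, line in enumerate(lines) if line.strip().lower().startswith('book')]
--     n = len(lines)
--     return [
--         {'number': j + 1,
--          'start_line': idx + 1,
--          'end_line': indices[j + 1] - 1 if j + 1 < len(indices) else n - 1}
--         for j, idx in enumerate(indices)
--     ]
-- ===== Notes on version B (the rewrite author's own statement) =====
-- stated objective: simpler
-- what changed: B first collects all marker line indices into one list, then emits each book dict fully formed using a lookahead into that list, replacing A's running counter and back-patching of the previous dict's end_line.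
import Mathlib
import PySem

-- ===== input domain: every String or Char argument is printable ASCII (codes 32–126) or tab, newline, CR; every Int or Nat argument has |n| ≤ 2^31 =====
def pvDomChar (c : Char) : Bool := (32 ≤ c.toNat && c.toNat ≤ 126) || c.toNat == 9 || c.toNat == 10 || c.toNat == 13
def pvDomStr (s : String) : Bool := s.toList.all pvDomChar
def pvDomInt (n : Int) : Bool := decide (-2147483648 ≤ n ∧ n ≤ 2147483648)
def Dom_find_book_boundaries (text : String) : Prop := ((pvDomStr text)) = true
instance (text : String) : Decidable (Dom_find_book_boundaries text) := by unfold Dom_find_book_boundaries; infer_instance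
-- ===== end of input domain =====

-- B builds the marker-index table once and emits each book dict fully formed (simpler decomposition);
-- A instead back-patches the previous dict's 'end_line' while scanning.

-- ===== PORT A =====
-- Python `d[k] = v` on an assoc list: overwrite in place, new key appends (exact).
def pvSetKey : List (String × Int) → String → Int → List (String × Int)
  | [], k, v => [(k, v)]
  | (k', v') :: rest, k, v => if k' == k then (k', v) :: rest else (k', v') :: pvSetKey rest k v

def find_book_boundaries (text : String) : List (List (String × Int)) :=
  let lines := (PySem.Str.split? text "\n").getD []   -- sep ≠ "", so split? is always `some`
  let st := (PySem.List.enumerate lines 0).foldl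
    (fun (st : List (List (String × Int)) × Int) (p : Int × String) =>
      if PySem.Str.startswith (PySem.Str.lower (PySem.Str.strip p.2)) "book" then
        let bbs := if st.2 > 0 then
            -- book_boundaries[-1]['end_line'] = i - 1  (mutate the last dict)
            st.1.dropLast ++ [pvSetKey (PySem.List.pyGetD st.1 (-1) []) "end_line" (p.1 - 1)]
          else st.1
        (bbs ++ [[("number", st.2 + 1), ("start_line", p.1 + 1)]], st.2 + 1)
      else st) ([], 0)
  if st.1 = [] then st.1
  else st.1.dropLast ++ [pvSetKey (PySem.List.pyGetD st.1 (-1) []) "end_line" ((lines.length : Int) - 1)]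

-- ===== PORT B =====
def find_book_boundaries_alt (text : String) : List (List (String × Int)) :=
  let lines := (PySem.Str.split? text "\n").getD []   -- sep ≠ "", so split? is always `some`
  let indices := (PySem.List.enumerate lines 0).filterMap
    (fun p => if PySem.Str.startswith (PySem.Str.lower (PySem.Str.strip p.2)) "book" then some p.1 else none)
  let n : Int := lines.length
  (PySem.List.enumerate indices 0).map (fun q =>
    [("number", q.1 + 1), ("start_line", q.2 + 1),
     ("end_line", if q.1 + 1 < (indices.length : Int)
                  then PySem.List.pyGetD indices (q.1 + 1) 0 - 1  -- indices[j+1], guarded in range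
                  else n - 1)])

-- ===== PRECONDITION & SPEC =====
def Spec_find_book_boundaries (text : String) (out : List (List (String × Int))) : Prop := out = find_book_boundaries_alt text
instance (text : String) (out : List (List (String × Int))) : Decidable (Spec_find_book_boundaries text out) := by unfold Spec_find_book_boundaries; infer_instance

-- ===== CLAIM (what is proved, stated in full; the proofs are below) =====
def Claim_equal_find_book_boundaries : Prop := ∀ (text : String), Dom_find_book_boundaries text → Spec_find_book_boundaries text (find_book_boundaries text)

-- ===== LEMMAS AND PROOFS =====

-- the common target: books from the current pending one (number num, start s) onward,
-- given the remaining marker indices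
def pvMkP (n num s : Int) : List Int → List (List (String × Int))
  | [] => [[("number", num), ("start_line", s), ("end_line", n - 1)]]
  | j :: rest => [("number", num), ("start_line", s), ("end_line", j - 1)] :: pvMkP n (num + 1) (j + 1) rest

theorem pvSetKey_pend (num s v : Int) :
    pvSetKey [("number", num), ("start_line", s)] "end_line" v
      = [("number", num), ("start_line", s), ("end_line", v)] := by
  simp [pvSetKey]

theorem foldA_inv (m : String → Bool) (n : Int) :
    ∀ (lines : List String) (off : Int) (done : List (List (String × Int))) (num s : Int),
      0 < num →
      (if ((PySem.List.enumerate lines off).foldl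
            (fun (st : List (List (String × Int)) × Int) (p : Int × String) =>
              if m p.2 then
                ((if st.2 > 0 then
                    st.1.dropLast ++ [pvSetKey (PySem.List.pyGetD st.1 (-1) []) "end_line" (p.1 - 1)]
                  else st.1) ++ [[("number", st.2 + 1), ("start_line", p.1 + 1)]], st.2 + 1)
              else st) (done ++ [[("number", num), ("start_line", s)]], num)).1 = [] then
        ((PySem.List.enumerate lines off).foldl
            (fun (st : List (List (String × Int)) × Int) (p : Int × String) =>
              if m p.2 then
                ((if st.2 > 0 then
                    st.1.dropLast ++ [pvSetKey (PySem.List.pyGetD st.1 (-1) []) "end_line" (p.1 - 1)]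
                  else st.1) ++ [[("number", st.2 + 1), ("start_line", p.1 + 1)]], st.2 + 1)
              else st) (done ++ [[("number", num), ("start_line", s)]], num)).1
      else
        ((PySem.List.enumerate lines off).foldl
            (fun (st : List (List (String × Int)) × Int) (p : Int × String) =>
              if m p.2 then
                ((if st.2 > 0 then
                    st.1.dropLast ++ [pvSetKey (PySem.List.pyGetD st.1 (-1) []) "end_line" (p.1 - 1)]
                  else st.1) ++ [[("number", st.2 + 1), ("start_line", p.1 + 1)]], st.2 + 1)
              else st) (done ++ [[("number", num), ("start_line", s)]], num)).1.dropLast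
          ++ [pvSetKey (PySem.List.pyGetD
                ((PySem.List.enumerate lines off).foldl
                  (fun (st : List (List (String × Int)) × Int) (p : Int × String) =>
                    if m p.2 then
                      ((if st.2 > 0 then
                          st.1.dropLast ++ [pvSetKey (PySem.List.pyGetD st.1 (-1) []) "end_line" (p.1 - 1)]
                        else st.1) ++ [[("number", st.2 + 1), ("start_line", p.1 + 1)]], st.2 + 1)
                    else st) (done ++ [[("number", num), ("start_line", s)]], num)).1 (-1) [])
                "end_line" (n - 1)])
      = done ++ pvMkP n num s
          ((PySem.List.enumerate lines off).filterMap (fun p => if m p.2 then some p.1 else none)) := by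
  intro lines
  induction lines with
  | nil =>
    intro off done num s hnum
    simp [PySem.List.enumerate, pvMkP, PySem.List.pyGetD_neg_one_append_singleton, pvSetKey_pend]
  | cons l rest ih =>
    intro off done num s hnum
    rw [PySem.List.enumerate_cons]
    by_cases hm : m l
    · simp only [List.foldl_cons, List.filterMap_cons, hm, if_pos]
      rw [if_pos (by omega : num > 0)]
      simp only [PySem.List.pyGetD_neg_one_append_singleton, List.dropLast_concat, pvSetKey_pend]
      rw [show (done ++ [[("number", num), ("start_line", s), ("end_line", off - 1)]])
            ++ [[("number", num + 1), ("start_line", off + 1)]]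
          = (done ++ [[("number", num), ("start_line", s), ("end_line", off - 1)]])
            ++ [[("number", num + 1), ("start_line", off + 1)]] from rfl]
      rw [ih (off + 1) (done ++ [[("number", num), ("start_line", s), ("end_line", off - 1)]])
            (num + 1) (off + 1) (by omega)]
      simp [pvMkP]
    · simp only [List.foldl_cons, List.filterMap_cons, hm, Bool.false_eq_true,
        not_false_eq_true, if_neg]
      exact ih (off + 1) done num s hnum

theorem foldA_zero (m : String → Bool) (n : Int) :
    ∀ (lines : List String) (off : Int),
      (if ((PySem.List.enumerate lines off).foldl
            (fun (st : List (List (String × Int)) × Int) (p : Int × String) =>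
              if m p.2 then
                ((if st.2 > 0 then
                    st.1.dropLast ++ [pvSetKey (PySem.List.pyGetD st.1 (-1) []) "end_line" (p.1 - 1)]
                  else st.1) ++ [[("number", st.2 + 1), ("start_line", p.1 + 1)]], st.2 + 1)
              else st) ([], 0)).1 = [] then
        ((PySem.List.enumerate lines off).foldl
            (fun (st : List (List (String × Int)) × Int) (p : Int × String) =>
              if m p.2 then
                ((if st.2 > 0 then
                    st.1.dropLast ++ [pvSetKey (PySem.List.pyGetD st.1 (-1) []) "end_line" (p.1 - 1)]
                  else st.1) ++ [[("number", st.2 + 1), ("start_line", p.1 + 1)]], st.2 + 1)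
              else st) ([], 0)).1
      else
        ((PySem.List.enumerate lines off).foldl
            (fun (st : List (List (String × Int)) × Int) (p : Int × String) =>
              if m p.2 then
                ((if st.2 > 0 then
                    st.1.dropLast ++ [pvSetKey (PySem.List.pyGetD st.1 (-1) []) "end_line" (p.1 - 1)]
                  else st.1) ++ [[("number", st.2 + 1), ("start_line", p.1 + 1)]], st.2 + 1)
              else st) ([], 0)).1.dropLast
          ++ [pvSetKey (PySem.List.pyGetD
                ((PySem.List.enumerate lines off).foldl
                  (fun (st : List (List (String × Int)) × Int) (p : Int × String) =>
                    if m p.2 then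
                      ((if st.2 > 0 then
                          st.1.dropLast ++ [pvSetKey (PySem.List.pyGetD st.1 (-1) []) "end_line" (p.1 - 1)]
                        else st.1) ++ [[("number", st.2 + 1), ("start_line", p.1 + 1)]], st.2 + 1)
                    else st) ([], 0)).1 (-1) [])
                "end_line" (n - 1)])
      = (match (PySem.List.enumerate lines off).filterMap (fun p => if m p.2 then some p.1 else none) with
         | [] => ([] : List (List (String × Int)))
         | i :: rest => pvMkP n 1 (i + 1) rest) := by
  intro lines
  induction lines with
  | nil => intro off; simp [PySem.List.enumerate]
  | cons l rest ih =>
    intro off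
    rw [PySem.List.enumerate_cons]
    by_cases hm : m l
    · simp only [List.foldl_cons, List.filterMap_cons, hm, if_pos]
      rw [if_neg (by omega : ¬ ((0:Int) > 0))]
      have := foldA_inv m n rest (off + 1) [] 1 (off + 1) (by omega)
      simpa using this
    · simp only [List.foldl_cons, List.filterMap_cons, hm, Bool.false_eq_true,
        not_false_eq_true, if_neg]
      exact ih (off + 1)

theorem mapB_inv (n : Int) :
    ∀ (rest : List Int) (pre : List Int) (i : Int),
      (PySem.List.enumerate (i :: rest) (pre.length : Int)).map (fun q =>
        [("number", q.1 + 1), ("start_line", q.2 + 1),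
         ("end_line", if q.1 + 1 < ((pre ++ i :: rest).length : Int)
                      then PySem.List.pyGetD (pre ++ i :: rest) (q.1 + 1) 0 - 1
                      else n - 1)])
      = pvMkP n ((pre.length : Int) + 1) (i + 1) rest := by
  intro rest
  induction rest with
  | nil =>
    intro pre i
    rw [PySem.List.enumerate_cons, PySem.List.enumerate_nil]
    simp [pvMkP]
  | cons j rest' ih =>
    intro pre i
    rw [PySem.List.enumerate_cons]
    simp only [List.map_cons]
    have hlen : ((pre.length : Int) + 1) < ((pre ++ i :: j :: rest').length : Int) := by
      simp
    have hget : PySem.List.pyGetD (pre ++ i :: j :: rest') ((pre.length : Int) + 1) 0 = j := by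
      have : ((pre.length : Int) + 1) = ((pre.length + 1 : Nat) : Int) := by push_cast; ring
      rw [this, PySem.List.pyGetD_natCast]
      simp [List.getD]
    rw [if_pos hlen, hget]
    have step := ih (pre ++ [i]) j
    have hlen2 : (((pre ++ [i]).length : Int)) = (pre.length : Int) + 1 := by simp
    have hass : (pre ++ [i]) ++ j :: rest' = pre ++ i :: j :: rest' := by simp
    rw [hlen2, hass] at step
    rw [step]
    simp [pvMkP]

theorem mapB_zero (n : Int) (idxs : List Int) :
    (PySem.List.enumerate idxs 0).map (fun q =>
      [("number", q.1 + 1), ("start_line", q.2 + 1),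
       ("end_line", if q.1 + 1 < (idxs.length : Int)
                    then PySem.List.pyGetD idxs (q.1 + 1) 0 - 1
                    else n - 1)])
    = (match idxs with
       | [] => ([] : List (List (String × Int)))
       | i :: rest => pvMkP n 1 (i + 1) rest) := by
  match idxs with
  | [] => simp [PySem.List.enumerate]
  | i :: rest =>
    have := mapB_inv n rest [] i
    simpa using this

-- ===== VERDICT (by name: the statement is the Claim_ definition above) =====
theorem find_book_boundaries_spec : Claim_equal_find_book_boundaries := by
  intro text _
  show find_book_boundaries text = find_book_boundaries_alt text
  simp only [find_book_boundaries, find_book_boundaries_alt]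
  generalize (PySem.Str.split? text "\n").getD [] = lines
  rw [foldA_zero (fun line => PySem.Str.startswith (PySem.Str.lower (PySem.Str.strip line)) "book")
       ((lines.length : Int)) lines 0,
     mapB_zero]
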